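-- pv_equiv track=rewrite | github.com/vosbek/codeanalyzer | parsers/jsp_parser.py | _infer_data_display_context
-- ===== SOURCE A (Python) =====
-- from typing import Dict, List, Any, Optional, Set, Tuple
--
-- def _infer_data_display_context(property_name: str, attributes: Dict[str, str]) -> str:
--     """Infer business context from data display patterns."""
--     prop_lower = property_name.lower()
--
--     if any(word in prop_lower for word in ['user', 'customer', 'person']):
--         return "User Information Display"
--     elif any(word in prop_lower for word in ['order', 'purchase', 'transaction']):
--         return "Order and Transaction Display"
--     elif any(word in prop_lower for word in ['product', 'item', 'catalog']):
--         return "Product Information Display"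
--     elif any(word in prop_lower for word in ['price', 'amount', 'total', 'cost']):
--         return "Financial Data Display"
--     elif any(word in prop_lower for word in ['date', 'time', 'created', 'updated']):
--         return "Temporal Data Display"
--     else:
--         return f"Business Data Display: {property_name}"
-- ===== SOURCE B (Python) =====
-- def _infer_data_display_context(property_name: str, attributes) -> str:
--     """Infer business context from data display patterns."""
--     keyword_cat = {
--         'user': 0, 'customer': 0, 'person': 0,
--         'order': 1, 'purchase': 1, 'transaction': 1,
--         'product': 2, 'item': 2, 'catalog': 2,
--         'price': 3, 'amount': 3, 'total': 3, 'cost': 3,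
--         'date': 4, 'time': 4, 'created': 4, 'updated': 4,
--     }
--     labels = [
--         "User Information Display",
--         "Order and Transaction Display",
--         "Product Information Display",
--         "Financial Data Display",
--         "Temporal Data Display",
--     ]
--     lengths = sorted({len(k) for k in keyword_cat})
--     s = property_name.lower()
--     n = len(s)
--     best = None
--     for i in range(n):
--         for L in lengths:
--             if i + L <= n:
--                 cat = keyword_cat.get(s[i:i + L])
--                 if cat is not None and (best is None or cat < best):
--                     best = cat
--     if best is None:
--         return f"Business Data Display: {property_name}"
--     return labels[best]
-- ===== Notes on version B (the rewrite author's own statement) =====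
-- stated objective: alternative
-- what changed: Instead of testing each hard-coded keyword group for substring containment, B builds a keyword->category hash map once and makes a single scan over the positions of the lowercased name, looking up each fixed-length slice in the map while keeping the minimum (highest-priority) category found; the per-keyword substring searches disappear.
import Mathlib
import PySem

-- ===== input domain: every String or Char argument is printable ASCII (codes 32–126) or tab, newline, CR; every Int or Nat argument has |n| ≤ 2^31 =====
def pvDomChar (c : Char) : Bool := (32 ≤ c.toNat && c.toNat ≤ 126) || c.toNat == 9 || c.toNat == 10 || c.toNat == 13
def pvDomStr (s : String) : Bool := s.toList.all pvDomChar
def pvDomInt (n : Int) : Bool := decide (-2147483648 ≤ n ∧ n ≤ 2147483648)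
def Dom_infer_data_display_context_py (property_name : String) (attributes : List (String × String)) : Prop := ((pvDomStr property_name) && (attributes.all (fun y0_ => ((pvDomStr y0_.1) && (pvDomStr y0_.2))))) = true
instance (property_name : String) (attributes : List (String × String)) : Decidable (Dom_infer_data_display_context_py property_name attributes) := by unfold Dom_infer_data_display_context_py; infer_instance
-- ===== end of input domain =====

-- B replaces A's per-keyword substring searches by one scan over the positions of the
-- lowercased name, looking up each fixed-length slice in a keyword->category map and
-- keeping the minimum (highest-priority) category (objective: alternative algorithm).

-- ===== PORT A =====
def infer_data_display_context_py (property_name : String) (attributes : List (String × String)) : String :=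
  let prop_lower := PySem.Str.lower property_name
  if ["user", "customer", "person"].any (fun word => PySem.Str.isIn word prop_lower) then
    "User Information Display"
  else if ["order", "purchase", "transaction"].any (fun word => PySem.Str.isIn word prop_lower) then
    "Order and Transaction Display"
  else if ["product", "item", "catalog"].any (fun word => PySem.Str.isIn word prop_lower) then
    "Product Information Display"
  else if ["price", "amount", "total", "cost"].any (fun word => PySem.Str.isIn word prop_lower) then
    "Financial Data Display"
  else if ["date", "time", "created", "updated"].any (fun word => PySem.Str.isIn word prop_lower) then
    "Temporal Data Display"
  else
    "Business Data Display: " ++ property_name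

-- ===== PORT B =====
-- the keyword -> category dict of Source B
def pvKwPairs : List (String × Int) :=
  [("user", 0), ("customer", 0), ("person", 0),
   ("order", 1), ("purchase", 1), ("transaction", 1),
   ("product", 2), ("item", 2), ("catalog", 2),
   ("price", 3), ("amount", 3), ("total", 3), ("cost", 3),
   ("date", 4), ("time", 4), ("created", 4), ("updated", 4)]

def pvKeywordCat : PySem.Dict String Int := PySem.Dict.ofList pvKwPairs

def pvLabels : List String :=
  ["User Information Display", "Order and Transaction Display",
   "Product Information Display", "Financial Data Display", "Temporal Data Display"]

-- lengths = sorted({len(k) for k in keyword_cat})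
def pvLengths : List Int :=
  PySem.List.sorted (PySem.Set.ofList (pvKeywordCat.keys.map (fun k => PySem.Str.len k))) (fun x => x) false

def infer_data_display_context_py_alt (property_name : String) (attributes : List (String × String)) : String :=
  let s := PySem.Str.lower property_name
  let n := PySem.Str.len s
  let best := (PySem.List.pyRange 0 n 1).foldl (fun best i =>
    pvLengths.foldl (fun best L =>
      if i + L ≤ n then
        match pvKeywordCat.get? (PySem.Str.slice s (some i) (some (i + L))) with
        | some cat =>
          match best with
          | none => some cat
          | some b => if cat < b then some cat else some b
        | none => best
      else best) best) none
  match best with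
  | some b => PySem.List.pyGetD pvLabels b ""   -- best is always a valid index 0..4, so this is Python's labels[best]
  | none => "Business Data Display: " ++ property_name

-- ===== PRECONDITION & SPEC =====
def Spec_infer_data_display_context_py (property_name : String) (attributes : List (String × String)) (out : String) : Prop := out = infer_data_display_context_py_alt property_name attributes
instance (property_name : String) (attributes : List (String × String)) (out : String) : Decidable (Spec_infer_data_display_context_py property_name attributes out) := by unfold Spec_infer_data_display_context_py; infer_instance

-- ===== CLAIM (what is proved, stated in full; the proofs are below) =====
def Claim_equal_infer_data_display_context_py : Prop := ∀ (property_name : String) (attributes : List (String × String)), Dom_infer_data_display_context_py property_name attributes → Spec_infer_data_display_context_py property_name attributes (infer_data_display_context_py property_name attributes)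

-- ===== LEMMAS AND PROOFS =====

-- the accumulator step of B's loop, as a binary "optional minimum"
def pvOmin (a b : Option Int) : Option Int :=
  match b with
  | none => a
  | some c =>
    match a with
    | none => some c
    | some x => if c < x then some c else some x

-- the candidate produced at position k with slice length L
def pvCand (s : String) (k : Nat) (L : Int) : Option Int :=
  if (k : Int) + L ≤ (s.toList.length : Int) then
    pvKeywordCat.get? (PySem.Str.slice s (some (k : Int)) (some ((k : Int) + L)))
  else none

def pvCands (s : String) : List (Option Int) :=
  (List.range s.toList.length).flatMap (fun k => pvLengths.map (fun L => pvCand s k L))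

-- category c has a keyword occurring in s
def pvMatched (s : String) (c : Int) : Prop :=
  ∃ w, (w, c) ∈ pvKwPairs ∧ PySem.Str.isIn w s = true

lemma pvOmin_eq_none_iff (a b : Option Int) : pvOmin a b = none ↔ a = none ∧ b = none := by
  cases a <;> cases b <;> simp [pvOmin] <;> split <;> simp

lemma pvOmin_spec (a b : Option Int) (m : Int) (h : pvOmin a b = some m) :
    (a = some m ∨ b = some m) ∧ (∀ y, a = some y → m ≤ y) ∧ (∀ y, b = some y → m ≤ y) := by
  cases b with
  | none =>
    simp only [pvOmin] at h
    refine ⟨Or.inl h, ?_, ?_⟩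
    · intro y hy
      rw [h] at hy
      have := Option.some.inj hy
      omega
    · intro y hy
      simp at hy
  | some c =>
    cases a with
    | none =>
      simp only [pvOmin] at h
      have hc := Option.some.inj h
      refine ⟨Or.inr (by rw [hc]), ?_, ?_⟩
      · intro y hy
        simp at hy
      · intro y hy
        have := Option.some.inj hy
        omega
    | some x =>
      simp only [pvOmin] at h
      split_ifs at h with hcx
      · have hc := Option.some.inj h
        refine ⟨Or.inr (by rw [hc]), ?_, ?_⟩
        · intro y hy
          have := Option.some.inj hy
          omega
        · intro y hy
          have := Option.some.inj hy
          omega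
      · have hc := Option.some.inj h
        refine ⟨Or.inl (by rw [hc]), ?_, ?_⟩
        · intro y hy
          have := Option.some.inj hy
          omega
        · intro y hy
          have := Option.some.inj hy
          omega

lemma pvFoldl_omin_none_iff (cands : List (Option Int)) (acc : Option Int) :
    cands.foldl pvOmin acc = none ↔ acc = none ∧ ∀ x ∈ cands, x = none := by
  induction cands generalizing acc with
  | nil => simp
  | cons x t ih =>
    simp only [List.foldl_cons, ih, pvOmin_eq_none_iff, List.mem_cons]
    constructor
    · rintro ⟨⟨ha, hx⟩, ht⟩
      refine ⟨ha, fun y hy => ?_⟩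
      rcases hy with hy | hy
      · rw [hy]; exact hx
      · exact ht y hy
    · rintro ⟨ha, ht⟩
      exact ⟨⟨ha, ht x (Or.inl rfl)⟩, fun y hy => ht y (Or.inr hy)⟩

lemma pvFoldl_omin_spec (cands : List (Option Int)) (acc : Option Int) (m : Int)
    (h : cands.foldl pvOmin acc = some m) :
    (some m ∈ cands ∨ acc = some m) ∧ (∀ b, some b ∈ cands → m ≤ b) ∧
      (∀ a, acc = some a → m ≤ a) := by
  induction cands generalizing acc with
  | nil =>
    simp only [List.foldl_nil] at h
    refine ⟨Or.inr h, by simp, fun a ha => ?_⟩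
    rw [h] at ha
    have := Option.some.inj ha
    omega
  | cons x t ih =>
    simp only [List.foldl_cons] at h
    obtain ⟨hmem, hbt, hacc'⟩ := ih (pvOmin acc x) h
    have hstep : ∀ z, pvOmin acc x = some z →
        (acc = some z ∨ x = some z) ∧ (∀ y, acc = some y → z ≤ y) ∧ (∀ y, x = some y → z ≤ y) :=
      fun z hz => pvOmin_spec acc x z hz
    refine ⟨?_, ?_, ?_⟩
    · rcases hmem with hm | hm
      · exact Or.inl (List.mem_cons_of_mem _ hm)
      · rcases (hstep m hm).1 with h1 | h1
        · exact Or.inr h1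
        · exact Or.inl (by rw [h1]; exact List.mem_cons_self ..)
    · intro b hb
      rcases List.mem_cons.mp hb with hb | hb
      · rcases hz : pvOmin acc x with _ | z
        · have := (pvOmin_eq_none_iff acc x).mp hz
          rw [this.2] at hb; simp at hb
        · have h1 := hacc' z hz
          have h2 := (hstep z hz).2.2 b hb.symm
          omega
      · exact hbt b hb
    · intro a ha
      rcases hz : pvOmin acc x with _ | z
      · have := (pvOmin_eq_none_iff acc x).mp hz
        rw [this.1] at ha; simp at ha
      · have h1 := hacc' z hz
        have h2 := (hstep z hz).2.1 a ha
        omega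

lemma pvDoubleFold (l : List Nat) (g : Nat → Int → Option Int) (acc : Option Int) :
    l.foldl (fun a k => pvLengths.foldl (fun a' L => pvOmin a' (g k L)) a) acc
      = (l.flatMap (fun k => pvLengths.map (g k))).foldl pvOmin acc := by
  induction l generalizing acc with
  | nil => rfl
  | cons x t ih =>
    simp only [List.foldl_cons, List.flatMap_cons, List.foldl_append, ih, List.foldl_map]

-- B's loop body equals pvOmin with pvCand
lemma pvStep_eq (s : String) (k : Nat) (L : Int) (best : Option Int) :
    (if (k : Int) + L ≤ ((s.toList.length : Nat) : Int) then
        match pvKeywordCat.get? (PySem.Str.slice s (some (k : Int)) (some ((k : Int) + L))) with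
        | some cat =>
          match best with
          | none => some cat
          | some b => if cat < b then some cat else some b
        | none => best
      else best) = pvOmin best (pvCand s k L) := by
  unfold pvCand
  split_ifs with h
  · cases pvKeywordCat.get? (PySem.Str.slice s (some (k : Int)) (some ((k : Int) + L))) <;>
      cases best <;> simp [pvOmin]
  · rfl

-- B's result, characterised through the candidate list
lemma pvAlt_eq (p : String) (attrs : List (String × String)) :
    infer_data_display_context_py_alt p attrs =
      (match (pvCands (PySem.Str.lower p)).foldl pvOmin none with
       | some b => PySem.List.pyGetD pvLabels b ""
       | none => "Business Data Display: " ++ p) := by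
  have hn : PySem.Str.len (PySem.Str.lower p) = (((PySem.Str.lower p).toList.length : Nat) : Int) := by
    simp [pysem]
  simp only [infer_data_display_context_py_alt, hn, pvCands]
  rw [PySem.List.pyRange_one]
  simp only [Int.sub_zero, Int.toNat_natCast, List.foldl_map, Int.zero_add]
  refine congrArg (fun r : Option Int =>
    (match r with
     | some b => PySem.List.pyGetD pvLabels b ""
     | none => "Business Data Display: " ++ p)) ?_
  rw [← pvDoubleFold]
  exact PySem.List.foldl_congr_mem _ _ _ _ (fun a k _ =>
    PySem.List.foldl_congr_mem _ _ _ _ (fun acc L _ => pvStep_eq (PySem.Str.lower p) k L acc))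

lemma pvKeys_nodup : pvKeywordCat.keys.Nodup := by decide
lemma pvItems_eq : pvKeywordCat.items = pvKwPairs := by decide
lemma pvPairs_len_mem : ∀ q ∈ pvKwPairs, ((q.1.toList.length : Nat) : Int) ∈ pvLengths := by decide
lemma pvPairs_ne_nil : ∀ q ∈ pvKwPairs, q.1.toList ≠ [] := by decide
lemma pvPairs_cat_range : ∀ q ∈ pvKwPairs, 0 ≤ q.2 ∧ q.2 ≤ 4 := by decide
lemma pvLengths_nonneg : ∀ L ∈ pvLengths, 0 ≤ L := by decide

-- slice of the lowered string, as a list of chars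
lemma pvSlice_toList (s : String) (k : Nat) (L : Int) (hL : 0 ≤ L) :
    (PySem.Str.slice s (some (k : Int)) (some ((k : Int) + L))).toList
      = (s.toList.drop k).take L.toNat := by
  have h1 : (PySem.Str.slice s (some (k : Int)) (some ((k : Int) + L))).toList
      = PySem.List.slice s.toList (some (k : Int)) (some ((k : Int) + L)) := by
    simp [pysem]
  rw [h1, PySem.List.slice_toNat s.toList (by positivity) (by omega)]
  simp only [Int.toNat_natCast]
  congr 1
  omega

-- some c is a candidate iff category c has an occurring keyword
lemma pvMem_cands_iff (s : String) (c : Int) :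
    some c ∈ pvCands s ↔ pvMatched s c := by
  constructor
  · intro hmem
    simp only [pvCands, List.mem_flatMap, List.mem_map, List.mem_range] at hmem
    obtain ⟨k, hk, L, hL, hcand⟩ := hmem
    unfold pvCand at hcand
    split_ifs at hcand with hbound
    · have hitem := PySem.Dict.mem_items_of_get?_eq_some _ hcand
      rw [pvItems_eq] at hitem
      refine ⟨_, hitem, ?_⟩
      have hL0 : 0 ≤ L := pvLengths_nonneg _ hL
      rw [PySem.Str.isIn_eq, pvSlice_toList s k L hL0, PySem.Chars.isIn_iff_infix]
      exact (List.take_prefix _ _).isInfix.trans (List.drop_suffix _ _).isInfix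
  · rintro ⟨w, hw, hin⟩
    have hin' : PySem.Chars.isIn w.toList s.toList = true := by
      simpa [pysem] using hin
    obtain ⟨j, hpre⟩ := (PySem.Chars.exists_prefix_drop_iff_isIn w.toList s.toList).mpr hin'
    have hwne : w.toList ≠ [] := pvPairs_ne_nil _ hw
    have hwlen : 0 < w.toList.length := List.length_pos_of_ne_nil hwne
    have hplen : w.toList.length ≤ s.toList.length - j := by
      simpa using hpre.length_le
    have hjlen : j + w.toList.length ≤ s.toList.length := by omega
    simp only [pvCands, List.mem_flatMap, List.mem_map, List.mem_range]
    refine ⟨j, by omega, (w.toList.length : Int), pvPairs_len_mem _ hw, ?_⟩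
    unfold pvCand
    rw [if_pos (by omega)]
    have hkey : PySem.Str.slice s (some (j : Int)) (some ((j : Int) + (w.toList.length : Int))) = w := by
      apply String.ext
      show (PySem.Str.slice s (some (j : Int)) (some ((j : Int) + (w.toList.length : Int)))).toList = w.toList
      rw [pvSlice_toList s j _ (by positivity)]
      simp only [Int.toNat_natCast]
      exact (List.prefix_iff_eq_take.mp hpre).symm
    rw [hkey]
    exact (PySem.Dict.get?_eq_some_iff_mem_items pvKeywordCat _ _ pvKeys_nodup).mpr
      (by rw [pvItems_eq]; exact hw)

-- A's five tests, in terms of pvMatched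
lemma pvCond0 (s : String) :
    (["user", "customer", "person"].any (fun word => PySem.Str.isIn word s) = true) ↔ pvMatched s 0 := by
  simp only [pvMatched, pvKwPairs, List.any_eq_true, List.mem_cons, List.not_mem_nil, or_false,
    Prod.mk.injEq]
  constructor
  · rintro ⟨w, hw, hin⟩
    exact ⟨w, by rcases hw with h | h | h <;> subst h <;> norm_num, hin⟩
  · rintro ⟨w, hw, hin⟩
    refine ⟨w, ?_, hin⟩
    rcases hw with h|h|h|h|h|h|h|h|h|h|h|h|h|h|h|h|h <;> norm_num at h <;> tauto

lemma pvCond1 (s : String) :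
    ((["order", "purchase", "transaction"].any (fun word => PySem.Str.isIn word s)) = true) ↔ pvMatched s 1 := by
  simp only [pvMatched, pvKwPairs, List.any_eq_true, List.mem_cons, List.not_mem_nil, or_false,
    Prod.mk.injEq]
  constructor
  · rintro ⟨w, hw, hin⟩
    refine ⟨w, ?_, hin⟩
    rcases hw with h | h | h <;> subst h <;> norm_num
  · rintro ⟨w, hw, hin⟩
    refine ⟨w, ?_, hin⟩
    rcases hw with h|h|h|h|h|h|h|h|h|h|h|h|h|h|h|h|h <;> norm_num at h <;> tauto

lemma pvCond2 (s : String) :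
    ((["product", "item", "catalog"].any (fun word => PySem.Str.isIn word s)) = true) ↔ pvMatched s 2 := by
  simp only [pvMatched, pvKwPairs, List.any_eq_true, List.mem_cons, List.not_mem_nil, or_false,
    Prod.mk.injEq]
  constructor
  · rintro ⟨w, hw, hin⟩
    refine ⟨w, ?_, hin⟩
    rcases hw with h | h | h <;> subst h <;> norm_num
  · rintro ⟨w, hw, hin⟩
    refine ⟨w, ?_, hin⟩
    rcases hw with h|h|h|h|h|h|h|h|h|h|h|h|h|h|h|h|h <;> norm_num at h <;> tauto

lemma pvCond3 (s : String) :
    ((["price", "amount", "total", "cost"].any (fun word => PySem.Str.isIn word s)) = true) ↔ pvMatched s 3 := by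
  simp only [pvMatched, pvKwPairs, List.any_eq_true, List.mem_cons, List.not_mem_nil, or_false,
    Prod.mk.injEq]
  constructor
  · rintro ⟨w, hw, hin⟩
    refine ⟨w, ?_, hin⟩
    rcases hw with h | h | h | h <;> subst h <;> norm_num
  · rintro ⟨w, hw, hin⟩
    refine ⟨w, ?_, hin⟩
    rcases hw with h|h|h|h|h|h|h|h|h|h|h|h|h|h|h|h|h <;> norm_num at h <;> tauto

lemma pvCond4 (s : String) :
    ((["date", "time", "created", "updated"].any (fun word => PySem.Str.isIn word s)) = true) ↔ pvMatched s 4 := by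
  simp only [pvMatched, pvKwPairs, List.any_eq_true, List.mem_cons, List.not_mem_nil, or_false,
    Prod.mk.injEq]
  constructor
  · rintro ⟨w, hw, hin⟩
    refine ⟨w, ?_, hin⟩
    rcases hw with h | h | h | h <;> subst h <;> norm_num
  · rintro ⟨w, hw, hin⟩
    refine ⟨w, ?_, hin⟩
    rcases hw with h|h|h|h|h|h|h|h|h|h|h|h|h|h|h|h|h <;> norm_num at h <;> tauto

-- ===== VERDICT (by name: the statement is the Claim_ definition above) =====
theorem infer_data_display_context_py_spec : Claim_equal_infer_data_display_context_py := by
  intro p attrs _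
  unfold Spec_infer_data_display_context_py
  rw [pvAlt_eq]
  set s := PySem.Str.lower p with hs
  rcases hfold : (pvCands s).foldl pvOmin none with _ | m
  · -- no keyword occurs: every category is unmatched, A takes the default branch
    have hnom : ∀ c, ¬ pvMatched s c := by
      intro c hc
      have hmem : some c ∈ pvCands s := (pvMem_cands_iff s c).mpr hc
      have := (pvFoldl_omin_none_iff (pvCands s) none).mp hfold
      exact absurd (this.2 _ hmem) (by simp)
    have c0 := (pvCond0 s).not.mpr (hnom 0)
    have c1 := (pvCond1 s).not.mpr (hnom 1)
    have c2 := (pvCond2 s).not.mpr (hnom 2)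
    have c3 := (pvCond3 s).not.mpr (hnom 3)
    have c4 := (pvCond4 s).not.mpr (hnom 4)
    simp only [Bool.not_eq_true] at c0 c1 c2 c3 c4
    simp only [infer_data_display_context_py, ← hs, c0, c1, c2, c3, c4, Bool.false_eq_true,
      if_false]
  · -- m is the minimum matched category; A returns the label of the first matched group = m
    obtain ⟨hmem, hmin, -⟩ := pvFoldl_omin_spec (pvCands s) none m hfold
    have hmatch : pvMatched s m := by
      rcases hmem with h | h
      · exact (pvMem_cands_iff s m).mp h
      · simp at h
    have hminM : ∀ c, pvMatched s c → m ≤ c := fun c hc =>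
      hmin c ((pvMem_cands_iff s c).mpr hc)
    obtain ⟨hm0, hm4⟩ : 0 ≤ m ∧ m ≤ 4 := by
      obtain ⟨w, hw, -⟩ := hmatch
      exact pvPairs_cat_range _ hw
    have hnotlt : ∀ c, c < m → ¬ pvMatched s c := fun c hcm hc => by
      have := hminM c hc; omega
    interval_cases m
    · have c0 := (pvCond0 s).mpr hmatch
      simp only [infer_data_display_context_py, ← hs, c0, if_true]
      rfl
    · have c0 : (["user", "customer", "person"].any (fun word => PySem.Str.isIn word s)) = false := by
        have := (pvCond0 s).not.mpr (hnotlt 0 (by omega)); simpa using this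
      have c1 := (pvCond1 s).mpr hmatch
      simp only [infer_data_display_context_py, ← hs, c0, c1, Bool.false_eq_true, if_false, if_true]
      rfl
    · have c0 : (["user", "customer", "person"].any (fun word => PySem.Str.isIn word s)) = false := by
        have := (pvCond0 s).not.mpr (hnotlt 0 (by omega)); simpa using this
      have c1 : (["order", "purchase", "transaction"].any (fun word => PySem.Str.isIn word s)) = false := by
        have := (pvCond1 s).not.mpr (hnotlt 1 (by omega)); simpa using this
      have c2 := (pvCond2 s).mpr hmatch
      simp only [infer_data_display_context_py, ← hs, c0, c1, c2, Bool.false_eq_true, if_false, if_true]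
      rfl
    · have c0 : (["user", "customer", "person"].any (fun word => PySem.Str.isIn word s)) = false := by
        have := (pvCond0 s).not.mpr (hnotlt 0 (by omega)); simpa using this
      have c1 : (["order", "purchase", "transaction"].any (fun word => PySem.Str.isIn word s)) = false := by
        have := (pvCond1 s).not.mpr (hnotlt 1 (by omega)); simpa using this
      have c2 : (["product", "item", "catalog"].any (fun word => PySem.Str.isIn word s)) = false := by
        have := (pvCond2 s).not.mpr (hnotlt 2 (by omega)); simpa using this
      have c3 := (pvCond3 s).mpr hmatch
      simp only [infer_data_display_context_py, ← hs, c0, c1, c2, c3, Bool.false_eq_true, if_false, if_true]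
      rfl
    · have c0 : (["user", "customer", "person"].any (fun word => PySem.Str.isIn word s)) = false := by
        have := (pvCond0 s).not.mpr (hnotlt 0 (by omega)); simpa using this
      have c1 : (["order", "purchase", "transaction"].any (fun word => PySem.Str.isIn word s)) = false := by
        have := (pvCond1 s).not.mpr (hnotlt 1 (by omega)); simpa using this
      have c2 : (["product", "item", "catalog"].any (fun word => PySem.Str.isIn word s)) = false := by
        have := (pvCond2 s).not.mpr (hnotlt 2 (by omega)); simpa using this
      have c3 : (["price", "amount", "total", "cost"].any (fun word => PySem.Str.isIn word s)) = false := by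
        have := (pvCond3 s).not.mpr (hnotlt 3 (by omega)); simpa using this
      have c4 := (pvCond4 s).mpr hmatch
      simp only [infer_data_display_context_py, ← hs, c0, c1, c2, c3, c4, Bool.false_eq_true, if_false, if_true]
      rfl
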